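-- pv_equiv track=rewrite | github.com/les2232/CCAIT_AI_supportassistant | router.py | legacy_select_response
-- ===== SOURCE A (Python) =====
-- def legacy_select_response(question, content_texts):
--     """Original hardcoded routing retained for comparison/evaluation."""
--     q = question.strip().lower()
--
--     if not q:
--         return None, None
--
--     if any(word in q for word in ["password", "login", "log in", "mycca"]):
--         return "password-reset.txt", content_texts.get("password-reset.txt")
--
--     if any(word in q for word in ["wifi", "internet", "network"]):
--         return "wifi-troubleshooting.txt", content_texts.get("wifi-troubleshooting.txt")
--
--     if any(
--         phrase in q for phrase in [
--             "d2l",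
--             "brightspace",
--             "learning management system",
--             "online course",
--             "online class",
--             "course material",
--             "course materials",
--             "submit assignment",
--             "submit an assignment",
--         ]
--     ):
--         return "d2l.txt", content_texts.get("d2l.txt")
--
--     if any(
--         phrase in q for phrase in [
--             "semester laptop",
--             "borrow a laptop",
--             "borrow laptop",
--             "check out a laptop",
--             "checkout a laptop",
--             "laptop loan",
--             "loaner laptop",
--             "borrow a calculator",
--             "borrow calculator",
--             "check out a calculator",
--             "checkout a calculator",
--             "graphing calculator",
--             "ti-84",
--         ]
--     ):
--         return "student-laptops-calculators.txt", content_texts.get("student-laptops-calculators.txt")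
--
--     if any(word in q for word in ["email", "outlook", "office", "student email"]):
--         return "student-email.txt", content_texts.get("student-email.txt")
--
--     return None, None
-- ===== SOURCE B (Python) =====
-- RULES = [
--     (["password", "login", "log in", "mycca"], "password-reset.txt"),
--     (["wifi", "internet", "network"], "wifi-troubleshooting.txt"),
--     ([
--         "d2l", "brightspace", "learning management system", "online course",
--         "online class", "course material", "course materials",
--         "submit assignment", "submit an assignment",
--     ], "d2l.txt"),
--     ([
--         "semester laptop", "borrow a laptop", "borrow laptop",
--         "check out a laptop", "checkout a laptop", "laptop loan",
--         "loaner laptop", "borrow a calculator", "borrow calculator",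
--         "check out a calculator", "checkout a calculator",
--         "graphing calculator", "ti-84",
--     ], "student-laptops-calculators.txt"),
--     (["email", "outlook", "office", "student email"], "student-email.txt"),
-- ]
--
-- # Flat keyword index: each keyword carries the priority of its rule group.
-- FLAT = [(kw, prio, fname)
--         for prio, (kws, fname) in enumerate(RULES)
--         for kw in kws]
--
--
-- def legacy_select_response(question, content_texts):
--     """Single full pass over a flat keyword index keeping the best (lowest
--     priority) match; no early return and no separate empty-query branch
--     (an empty query matches no keyword, so it falls through to None)."""
--     q = question.strip().lower()
--     best = None
--     for kw, prio, fname in FLAT: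
--         if kw in q and (best is None or prio < best[0]):
--             best = (prio, fname)
--     if best is None:
--         return None, None
--     return best[1], content_texts.get(best[1])
-- ===== Notes on version B (the rewrite author's own statement) =====
-- stated objective: alternative
-- what changed: Instead of A's chain of five if-blocks each returning early on its group's first keyword hit, B builds a flat keyword->(priority,filename) index and makes one full pass over it with a best-so-far minimum-priority accumulator (the empty-query branch disappears since an empty query matches nothing), then answers from the accumulated best match.
import Mathlib
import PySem

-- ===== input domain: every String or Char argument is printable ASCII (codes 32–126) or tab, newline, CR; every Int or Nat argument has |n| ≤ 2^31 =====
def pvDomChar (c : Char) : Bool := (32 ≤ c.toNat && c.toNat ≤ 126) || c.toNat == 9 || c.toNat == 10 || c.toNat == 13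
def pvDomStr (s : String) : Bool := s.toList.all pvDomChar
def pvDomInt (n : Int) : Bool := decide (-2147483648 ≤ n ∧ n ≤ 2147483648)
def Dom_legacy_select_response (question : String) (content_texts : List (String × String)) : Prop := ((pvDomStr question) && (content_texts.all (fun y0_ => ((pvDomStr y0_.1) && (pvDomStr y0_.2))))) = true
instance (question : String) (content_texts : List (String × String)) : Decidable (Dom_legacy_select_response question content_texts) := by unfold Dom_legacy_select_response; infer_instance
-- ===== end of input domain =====

-- B replaces A's early-return chain of five keyword groups by one full pass over a
-- flat keyword index keeping the lowest-priority match (objective: simpler/alternative).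
-- Return value only; neither version mutates its arguments.

-- ===== PORT A =====
-- literal transliteration: strip+lower, empty check, then five if-blocks in order
def legacy_select_response (question : String) (content_texts : List (String × String)) : Option String × Option String :=
  let q := PySem.Str.lower (PySem.Str.strip question)
  let d := PySem.Dict.ofList content_texts
  if q = "" then (none, none)
  else if ["password", "login", "log in", "mycca"].any (fun w => PySem.Str.isIn w q) then
    (some "password-reset.txt", d.get? "password-reset.txt")
  else if ["wifi", "internet", "network"].any (fun w => PySem.Str.isIn w q) then
    (some "wifi-troubleshooting.txt", d.get? "wifi-troubleshooting.txt")
  else if ["d2l", "brightspace", "learning management system", "online course",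
           "online class", "course material", "course materials",
           "submit assignment", "submit an assignment"].any (fun w => PySem.Str.isIn w q) then
    (some "d2l.txt", d.get? "d2l.txt")
  else if ["semester laptop", "borrow a laptop", "borrow laptop", "check out a laptop",
           "checkout a laptop", "laptop loan", "loaner laptop", "borrow a calculator",
           "borrow calculator", "check out a calculator", "checkout a calculator",
           "graphing calculator", "ti-84"].any (fun w => PySem.Str.isIn w q) then
    (some "student-laptops-calculators.txt", d.get? "student-laptops-calculators.txt")
  else if ["email", "outlook", "office", "student email"].any (fun w => PySem.Str.isIn w q) then
    (some "student-email.txt", d.get? "student-email.txt")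
  else (none, none)

-- ===== PORT B =====
-- B's rule table, in priority order (module-level RULES in Source B)
def pvRules : List (List String × String) :=
  [(["password", "login", "log in", "mycca"], "password-reset.txt"),
   (["wifi", "internet", "network"], "wifi-troubleshooting.txt"),
   (["d2l", "brightspace", "learning management system", "online course",
     "online class", "course material", "course materials",
     "submit assignment", "submit an assignment"], "d2l.txt"),
   (["semester laptop", "borrow a laptop", "borrow laptop", "check out a laptop",
     "checkout a laptop", "laptop loan", "loaner laptop", "borrow a calculator",
     "borrow calculator", "check out a calculator", "checkout a calculator",
     "graphing calculator", "ti-84"], "student-laptops-calculators.txt"),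
   (["email", "outlook", "office", "student email"], "student-email.txt")]

-- flat keyword index: (keyword, rule priority, filename), as Source B's FLAT comprehension
def pvFlat : List (String × Int × String) :=
  (PySem.List.enumerate pvRules).flatMap (fun pr => pr.2.1.map (fun kw => (kw, pr.1, pr.2.2)))

-- one step of B's loop body: keep the best (lowest-priority) match so far
def pvStep (q : String) (best : Option (Int × String)) (t : String × Int × String) : Option (Int × String) :=
  if PySem.Str.isIn t.1 q &&
     (match best with | none => true | some pa => decide (t.2.1 < pa.1)) then
    some (t.2.1, t.2.2)
  else best

def legacy_select_response_alt (question : String) (content_texts : List (String × String)) : Option String × Option String :=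
  let q := PySem.Str.lower (PySem.Str.strip question)
  match pvFlat.foldl (pvStep q) none with
  | none => (none, none)
  | some best => (some best.2, (PySem.Dict.ofList content_texts).get? best.2)

-- ===== PRECONDITION & SPEC =====
def Spec_legacy_select_response (question : String) (content_texts : List (String × String)) (out : Option String × Option String) : Prop := out = legacy_select_response_alt question content_texts
instance (question : String) (content_texts : List (String × String)) (out : Option String × Option String) : Decidable (Spec_legacy_select_response question content_texts out) := by unfold Spec_legacy_select_response; infer_instance

-- ===== CLAIM (what is proved, stated in full; the proofs are below) =====
def Claim_equal_legacy_select_response : Prop := ∀ (question : String) (content_texts : List (String × String)), Dom_legacy_select_response question content_texts → Spec_legacy_select_response question content_texts (legacy_select_response question content_texts)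

-- ===== LEMMAS AND PROOFS =====

-- folding B's step over one rule group (constant priority p, filename f):
-- the accumulator changes iff it is beatable (none or worse than p) and some keyword matches
theorem pv_foldl_group (q : String) (p : Int) (f : String) (l : List String) (acc : Option (Int × String)) :
    l.foldl (fun b kw => pvStep q b (kw, p, f)) acc =
      if ((match acc with | none => true | some pa => decide (p < pa.1)) &&
          l.any (fun w => PySem.Str.isIn w q)) then some (p, f) else acc := by
  induction l generalizing acc with
  | nil => simp
  | cons kw rest ih =>
    rw [List.foldl_cons, ih]
    simp only [pvStep, List.any_cons]
    cases acc with
    | none =>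
      rcases Bool.eq_false_or_eq_true (PySem.Str.isIn kw q) with hk | hk <;>
        simp only [hk] <;> simp
    | some pa =>
      rcases Bool.eq_false_or_eq_true (PySem.Str.isIn kw q) with hk | hk <;>
        by_cases hp : p < pa.1 <;> simp only [hk] <;> simp [hp]

-- the flat index splits into its five constant-priority group maps
theorem pvFlat_eq :
    pvFlat =
      (["password", "login", "log in", "mycca"].map (fun kw => (kw, (0:Int), "password-reset.txt"))) ++
      (["wifi", "internet", "network"].map (fun kw => (kw, (1:Int), "wifi-troubleshooting.txt"))) ++
      (["d2l", "brightspace", "learning management system", "online course",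
        "online class", "course material", "course materials",
        "submit assignment", "submit an assignment"].map (fun kw => (kw, (2:Int), "d2l.txt"))) ++
      (["semester laptop", "borrow a laptop", "borrow laptop", "check out a laptop",
        "checkout a laptop", "laptop loan", "loaner laptop", "borrow a calculator",
        "borrow calculator", "check out a calculator", "checkout a calculator",
        "graphing calculator", "ti-84"].map (fun kw => (kw, (3:Int), "student-laptops-calculators.txt"))) ++
      (["email", "outlook", "office", "student email"].map (fun kw => (kw, (4:Int), "student-email.txt"))) := by
  rfl

-- ===== VERDICT (by name: the statement is the Claim_ definition above) =====
theorem legacy_select_response_spec : Claim_equal_legacy_select_response := by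
  intro question content_texts _
  unfold Spec_legacy_select_response
  simp only [legacy_select_response, legacy_select_response_alt, pvFlat_eq,
             List.foldl_append, List.foldl_map, pv_foldl_group]
  set q := PySem.Str.lower (PySem.Str.strip question) with hq
  by_cases h0 : q = ""
  · rw [h0]
    have e1 : (["password", "login", "log in", "mycca"].any (fun w => PySem.Str.isIn w "")) = false := by decide
    have e2 : (["wifi", "internet", "network"].any (fun w => PySem.Str.isIn w "")) = false := by decide
    have e3 : (["d2l", "brightspace", "learning management system", "online course",
        "online class", "course material", "course materials",
        "submit assignment", "submit an assignment"].any (fun w => PySem.Str.isIn w "")) = false := by decide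
    have e4 : (["semester laptop", "borrow a laptop", "borrow laptop", "check out a laptop",
        "checkout a laptop", "laptop loan", "loaner laptop", "borrow a calculator",
        "borrow calculator", "check out a calculator", "checkout a calculator",
        "graphing calculator", "ti-84"].any (fun w => PySem.Str.isIn w "")) = false := by decide
    have e5 : (["email", "outlook", "office", "student email"].any (fun w => PySem.Str.isIn w "")) = false := by decide
    simp only [e1, e2, e3, e4, e5]
    simp
  · rcases Bool.eq_false_or_eq_true (["password", "login", "log in", "mycca"].any (fun w => PySem.Str.isIn w q)) with a1 | a1 <;>
    rcases Bool.eq_false_or_eq_true (["wifi", "internet", "network"].any (fun w => PySem.Str.isIn w q)) with a2 | a2 <;>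
    rcases Bool.eq_false_or_eq_true (["d2l", "brightspace", "learning management system", "online course",
        "online class", "course material", "course materials",
        "submit assignment", "submit an assignment"].any (fun w => PySem.Str.isIn w q)) with a3 | a3 <;>
    rcases Bool.eq_false_or_eq_true (["semester laptop", "borrow a laptop", "borrow laptop", "check out a laptop",
        "checkout a laptop", "laptop loan", "loaner laptop", "borrow a calculator",
        "borrow calculator", "check out a calculator", "checkout a calculator",
        "graphing calculator", "ti-84"].any (fun w => PySem.Str.isIn w q)) with a4 | a4 <;>
    rcases Bool.eq_false_or_eq_true (["email", "outlook", "office", "student email"].any (fun w => PySem.Str.isIn w q)) with a5 | a5 <;>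
      simp only [a1, a2, a3, a4, a5] <;> simp [h0]
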